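-- pv_equiv track=rewrite | github.com/a645162/ysuauth | ysuauth_python/src/config.py | getFilenameAndExtension
-- ===== SOURCE A (Python) =====
-- def getFilenameAndExtension(filename):
--     filenames = filename.strip().split(".")
--     l = len(filenames)
--     if l == 1:
--         return filename.strip(), ""
--     else:
--         name = filenames[0]
--         for i in range(1, l - 1):
--             name += "." + filenames[i]
--
--         extension = filenames[l - 1]
--
--         return name, extension
-- ===== SOURCE B (Python) =====
-- def getFilenameAndExtension(filename):
--     s = filename.strip()
--     idx = s.rfind(".")
--     if idx == -1:
--         return s, ""
--     return s[:idx], s[idx + 1:]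
-- ===== Notes on version B (the rewrite author's own statement) =====
-- stated objective: simpler
-- what changed: Replaces A's split-into-all-tokens plus index-loop reconcatenation with a single rfind for the last dot and two slices, keeping no intermediate list.
import Mathlib
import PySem

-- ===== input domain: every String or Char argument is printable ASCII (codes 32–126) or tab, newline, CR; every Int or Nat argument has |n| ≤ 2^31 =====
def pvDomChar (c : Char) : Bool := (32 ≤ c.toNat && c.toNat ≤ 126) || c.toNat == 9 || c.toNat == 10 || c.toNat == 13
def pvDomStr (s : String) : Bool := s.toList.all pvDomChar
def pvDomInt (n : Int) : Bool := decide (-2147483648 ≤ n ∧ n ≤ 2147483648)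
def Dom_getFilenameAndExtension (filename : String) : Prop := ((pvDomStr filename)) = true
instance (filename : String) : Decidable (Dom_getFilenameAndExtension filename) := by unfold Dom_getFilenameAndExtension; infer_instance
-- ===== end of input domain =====

-- B replaces A's split-into-all-tokens plus index-loop reconcatenation by a single
-- rfind of the last dot and two slices; objective: simpler (same asymptotic cost).


-- ===== PORT A =====
def getFilenameAndExtension (filename : String) : String × String :=
  let s := PySem.Chars.strip filename.toList
  let filenames := PySem.Chars.splitOn s ['.']
  let l : Int := filenames.length
  if l == 1 then
    (String.ofList s, "")
  else
    let name := PySem.List.pyGetD filenames 0 []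
    let name := (PySem.List.pyRange 1 (l - 1)).foldl
      (fun acc i => acc ++ '.' :: PySem.List.pyGetD filenames i []) name
    let extension := PySem.List.pyGetD filenames (l - 1) []
    (String.ofList name, String.ofList extension)

-- ===== PORT B =====
def getFilenameAndExtension_alt (filename : String) : String × String :=
  let s := PySem.Chars.strip filename.toList
  let idx := PySem.Chars.rfind s ['.']
  if idx == -1 then
    (String.ofList s, "")
  else
    (String.ofList (PySem.Chars.slice s none (some idx)),
     String.ofList (PySem.Chars.slice s (some (idx + 1)) none))

-- ===== PRECONDITION & SPEC =====
def Spec_getFilenameAndExtension (filename : String) (out : String × String) : Prop := out = getFilenameAndExtension_alt filename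
instance (filename : String) (out : String × String) : Decidable (Spec_getFilenameAndExtension filename out) := by unfold Spec_getFilenameAndExtension; infer_instance

-- ===== CLAIM (what is proved, stated in full; the proofs are below) =====
def Claim_equal_getFilenameAndExtension : Prop := ∀ (filename : String), Dom_getFilenameAndExtension filename → Spec_getFilenameAndExtension filename (getFilenameAndExtension filename)

-- ===== LEMMAS AND PROOFS =====

/-- Reference splitter: the chunks of `cs` between '.' separators, front to back. -/
def sp : List Char → List (List Char)
  | [] => [[]]
  | c :: rest => if c = '.' then [] :: sp rest else (sp rest).modifyHead (c :: ·)

/-- Reference joiner with '.' separators. -/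
def jn : List (List Char) → List Char
  | [] => []
  | [x] => x
  | x :: y :: t => x ++ '.' :: jn (y :: t)

theorem sp_ne_nil (cs : List Char) : sp cs ≠ [] := by
  induction cs with
  | nil => simp [sp]
  | cons c rest ih =>
    simp only [sp]
    split
    · simp
    · intro h; apply ih; simpa using congrArg List.length h

theorem modifyHead_append_of_ne_nil {α : Type} (f : α → α) (l l2 : List α) (h : l ≠ []) :
    (l ++ l2).modifyHead f = l.modifyHead f ++ l2 := by
  cases l with
  | nil => exact absurd rfl h
  | cons x t => simp

theorem modifyHead_id_fun {α : Type} (l : List α) : l.modifyHead (fun x => x) = l := by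
  cases l <;> simp

theorem splitOn_go_eq (fuel : Nat) : ∀ (cs cur : List Char) (acc : List (List Char)),
    cs.length < fuel →
    PySem.Chars.splitOn.go ['.'] fuel cs cur acc
      = acc.reverse ++ (sp cs).modifyHead (cur.reverse ++ ·) := by
  induction fuel with
  | zero => intro cs cur acc h; omega
  | succ f ih =>
    intro cs cur acc h
    cases cs with
    | nil =>
      simp [PySem.Chars.splitOn.go, sp]
    | cons c rest =>
      by_cases hc : c = '.'
      · subst hc
        have h1 : PySem.Chars.splitOn.go ['.'] (f+1) ('.' :: rest) cur acc
            = PySem.Chars.splitOn.go ['.'] f rest [] (cur.reverse :: acc) := by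
          simp [PySem.Chars.splitOn.go, List.isPrefixOf]
        rw [h1, ih rest [] (cur.reverse :: acc) (by simpa using h)]
        simp [sp, modifyHead_id_fun]
      · have h1 : PySem.Chars.splitOn.go ['.'] (f+1) (c :: rest) cur acc
            = PySem.Chars.splitOn.go ['.'] f rest (c :: cur) acc := by
          simp [PySem.Chars.splitOn.go, List.isPrefixOf, Ne.symm hc]
        rw [h1, ih rest (c :: cur) acc (by simpa using h)]
        simp only [sp, hc, if_false, List.reverse_cons]
        cases sp rest <;> simp

theorem splitOn_eq_sp (cs : List Char) : PySem.Chars.splitOn cs ['.'] = sp cs := by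
  have := splitOn_go_eq (cs.length + 1) cs [] [] (by omega)
  simpa [PySem.Chars.splitOn, modifyHead_id_fun] using this

theorem sp_no_dot (cs : List Char) (h : '.' ∉ cs) : sp cs = [cs] := by
  induction cs with
  | nil => rfl
  | cons c rest ih =>
    simp only [List.mem_cons, not_or] at h
    simp [sp, ih h.2]
    exact fun hh => h.1 hh.symm

theorem sp_append_dot (pre suf : List Char) (h : '.' ∉ suf) :
    sp (pre ++ '.' :: suf) = sp pre ++ [suf] := by
  induction pre with
  | nil => simp [sp, sp_no_dot suf h]
  | cons c pre' ih =>
    by_cases hc : c = '.'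
    · simp [sp, hc, ih]
    · simp only [List.cons_append, sp, hc, if_false, ih]
      exact modifyHead_append_of_ne_nil _ _ _ (sp_ne_nil pre')

theorem jn_cons (x : List Char) (xs : List (List Char)) (h : xs ≠ []) :
    jn (x :: xs) = x ++ '.' :: jn xs := by
  cases xs with
  | nil => exact absurd rfl h
  | cons y t => rfl

theorem jn_sp (pre : List Char) : jn (sp pre) = pre := by
  induction pre with
  | nil => rfl
  | cons c rest ih =>
    by_cases hc : c = '.'
    · subst hc
      simp only [sp, if_true]
      rw [jn_cons _ _ (sp_ne_nil rest), ih]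
      rfl
    · simp only [sp, hc, if_false]
      cases hrest : sp rest with
      | nil => exact absurd hrest (sp_ne_nil rest)
      | cons x t =>
        rw [hrest] at ih
        cases t with
        | nil => simpa [List.modifyHead, jn] using ih
        | cons y t' =>
          simp only [List.modifyHead]
          rw [jn_cons _ _ (by simp)]
          rw [jn_cons _ _ (by simp)] at ih
          simp [← ih]

theorem jn_eq_head_flatMap (Q : List (List Char)) (h : Q ≠ []) :
    jn Q = Q.head h ++ (Q.drop 1).flatMap (fun p => '.' :: p) := by
  induction Q with
  | nil => exact absurd rfl h
  | cons x xs ih =>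
    cases xs with
    | nil => simp [jn]
    | cons y t =>
      rw [jn_cons _ _ (by simp), ih (by simp)]
      simp

theorem rfind_go_no_dot (cs : List Char) (h : '.' ∉ cs) :
    ∀ j, PySem.Chars.rfind.go cs ['.'] j = -1 := by
  intro j
  induction j with
  | zero =>
    have h0 : PySem.Chars.rfind.go cs ['.'] 0
        = if ['.'].isPrefixOf cs then 0 else -1 := by
      simp only [PySem.Chars.rfind.go]
    rw [h0]
    split
    · next hp =>
      exact absurd ((List.isPrefixOf_iff_prefix.mp hp).subset (by simp)) h
    · rfl
  | succ j ih =>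
    have h1 : PySem.Chars.rfind.go cs ['.'] (j+1)
        = if ['.'].isPrefixOf (cs.drop (j+1)) then ((j:Int)+1) else PySem.Chars.rfind.go cs ['.'] j := by
      simp only [PySem.Chars.rfind.go]
      split <;> simp
    rw [h1]
    split
    · next hp =>
      exact absurd (List.drop_subset _ _ ((List.isPrefixOf_iff_prefix.mp hp).subset (by simp))) h
    · exact ih

theorem rfind_go_last (pre suf : List Char) (hs : '.' ∉ suf) :
    ∀ j, pre.length ≤ j →
      PySem.Chars.rfind.go (pre ++ '.' :: suf) ['.'] j = pre.length := by
  intro j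
  induction j with
  | zero =>
    intro hj
    have hpre : pre = [] := List.length_eq_zero_iff.mp (Nat.le_zero.mp hj)
    subst hpre
    simp [PySem.Chars.rfind.go, List.isPrefixOf]
  | succ j ih =>
    intro hj
    have h1 : PySem.Chars.rfind.go (pre ++ '.' :: suf) ['.'] (j+1)
        = if ['.'].isPrefixOf ((pre ++ '.' :: suf).drop (j+1)) then ((j:Int)+1)
          else PySem.Chars.rfind.go (pre ++ '.' :: suf) ['.'] j := by
      simp only [PySem.Chars.rfind.go]
      split <;> simp
    rw [h1]
    by_cases he : pre.length = j + 1
    · have hd : (pre ++ '.' :: suf).drop (j+1) = '.' :: suf := by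
        rw [← he]
        simp
      rw [hd]
      simp [List.isPrefixOf, he]
    · have hlt : pre.length ≤ j := by omega
      have hd : (pre ++ '.' :: suf).drop (j+1) = suf.drop (j - pre.length) := by
        rw [List.drop_append, List.drop_of_length_le (by omega)]
        have : j + 1 - pre.length = (j - pre.length) + 1 := by omega
        rw [this, List.drop_succ_cons]
        simp
      have hp : (['.'].isPrefixOf ((pre ++ '.' :: suf).drop (j+1))) = false := by
        rw [hd]
        cases hsd : suf.drop (j - pre.length) with
        | nil => simp [List.isPrefixOf]
        | cons a t =>
          have ha : a ∈ suf := List.drop_subset _ _ (by rw [hsd]; simp)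
          have : a ≠ '.' := fun h => hs (h ▸ ha)
          simp [List.isPrefixOf, Ne.symm this]
      rw [hp]
      simp only [Bool.false_eq_true, if_false]
      exact ih hlt

theorem rfind_last (pre suf : List Char) (hs : '.' ∉ suf) :
    PySem.Chars.rfind (pre ++ '.' :: suf) ['.'] = pre.length := by
  have : PySem.Chars.rfind (pre ++ '.' :: suf) ['.']
      = PySem.Chars.rfind.go (pre ++ '.' :: suf) ['.'] (pre ++ '.' :: suf).length := rfl
  rw [this, rfind_go_last pre suf hs _ (by simp)]

theorem rfind_no_dot (cs : List Char) (h : '.' ∉ cs) :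
    PySem.Chars.rfind cs ['.'] = -1 := rfind_go_no_dot cs h _

-- A's index loop computes jn of the chunks without the last one.
theorem foldA_eq (Q : List (List Char)) (x : List Char) (hQ : Q ≠ []) :
    (PySem.List.pyRange 1 (((Q ++ [x]).length : Int) - 1)).foldl
      (fun acc i => acc ++ '.' :: PySem.List.pyGetD (Q ++ [x]) i []) (PySem.List.pyGetD (Q ++ [x]) 0 [])
    = jn Q := by
  have hb : ((Q ++ [x]).length : Int) - 1 = PySem.List.len Q := by
    simp [PySem.List.len]
  rw [hb]
  have hcongr : (PySem.List.pyRange 1 (PySem.List.len Q)).foldl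
      (fun acc i => acc ++ '.' :: PySem.List.pyGetD (Q ++ [x]) i []) (PySem.List.pyGetD (Q ++ [x]) 0 [])
    = (PySem.List.pyRange 1 (PySem.List.len Q)).foldl
      (fun acc j => (fun (a : List Char) (p : List Char) => a ++ '.' :: p) acc (PySem.List.pyGetD Q j [])) (PySem.List.pyGetD (Q ++ [x]) 0 []) := by
    apply PySem.List.foldl_congr_mem
    intro acc i hi
    obtain ⟨h1, h2⟩ := (PySem.List.mem_pyRange_one).mp hi
    have hlt : i.toNat < Q.length := by
      simp only [PySem.List.len] at h2; omega
    have hik : i = ((i.toNat : Nat) : Int) := by omega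
    rw [hik, PySem.List.pyGetD_natCast, PySem.List.pyGetD_natCast]
    rw [List.getD_eq_getElem _ _ (by simp; omega), List.getD_eq_getElem _ _ hlt,
        List.getElem_append_left hlt]
  rw [hcongr]
  refine Eq.trans (PySem.List.foldl_pyRange_pyGetD Q [] (fun a p => a ++ '.' :: p) _ (by norm_num)) ?_
  have hinit : PySem.List.pyGetD (Q ++ [x]) 0 [] = Q.head hQ := by
    rw [PySem.List.pyGetD_zero]
    cases Q with
    | nil => exact absurd rfl hQ
    | cons a t => simp
  rw [hinit]
  have htoNat : (1 : Int).toNat = 1 := rfl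
  rw [htoNat, PySem.List.foldl_append_eq_flatMap (fun p => '.' :: p)]
  rw [jn_eq_head_flatMap Q hQ]

-- ===== VERDICT (by name: the statement is the Claim_ definition above) =====
theorem getFilenameAndExtension_spec : Claim_equal_getFilenameAndExtension := by
  intro filename _
  unfold Spec_getFilenameAndExtension getFilenameAndExtension getFilenameAndExtension_alt
  set cs := PySem.Chars.strip filename.toList with hcs
  by_cases hd : '.' ∈ cs
  · -- there is a dot: split around the last one
    have hrev : '.' ∈ cs.reverse := by simpa using hd
    obtain ⟨as, bs, hsplit, has⟩ := List.eq_append_cons_of_mem hrev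
    have hcseq : cs = bs.reverse ++ '.' :: as.reverse := by
      have := congrArg List.reverse hsplit
      simpa using this
    set pre := bs.reverse
    set suf := as.reverse
    have hsuf : '.' ∉ suf := by simpa [suf] using has
    have hsp : PySem.Chars.splitOn cs ['.'] = sp pre ++ [suf] := by
      rw [hcseq, splitOn_eq_sp, sp_append_dot pre suf hsuf]
    have hlen2 : 2 ≤ (PySem.Chars.splitOn cs ['.']).length := by
      rw [hsp]
      have := sp_ne_nil pre
      cases hp : sp pre with
      | nil => exact absurd hp this
      | cons a t => simp
    have hne1 : ((((PySem.Chars.splitOn cs ['.']).length : Int)) == 1) = false := by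
      simp only [beq_eq_false_iff_ne, ne_eq]
      intro h
      omega
    have hrf : PySem.Chars.rfind cs ['.'] = (pre.length : Int) := by
      rw [hcseq]; exact rfind_last pre suf hsuf
    have hrne : ((PySem.Chars.rfind cs ['.']) == (-1 : Int)) = false := by
      rw [hrf]; simp only [beq_eq_false_iff_ne, ne_eq]; omega
    simp only [hne1, hrne, Bool.false_eq_true, if_false]
    have hname : (PySem.List.pyRange 1 (((PySem.Chars.splitOn cs ['.']).length : Int) - 1)).foldl
        (fun acc i => acc ++ '.' :: PySem.List.pyGetD (PySem.Chars.splitOn cs ['.']) i [])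
        (PySem.List.pyGetD (PySem.Chars.splitOn cs ['.']) 0 []) = pre := by
      rw [hsp, foldA_eq (sp pre) suf (sp_ne_nil pre), jn_sp]
    have hext : PySem.List.pyGetD (PySem.Chars.splitOn cs ['.'])
        (((PySem.Chars.splitOn cs ['.']).length : Int) - 1) [] = suf := by
      rw [hsp]
      have h1 : (((sp pre ++ [suf]).length : Int) - 1) = (((sp pre).length : Nat) : Int) := by
        simp
      rw [h1, PySem.List.pyGetD_natCast]
      simp
    have hsl1 : PySem.Chars.slice cs none (some ((pre.length : Nat) : Int)) = pre := by
      rw [PySem.Chars.slice_eq_listSlice, PySem.List.slice_to _ (by positivity)]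
      rw [hcseq]
      simp [List.take_left']
    have hsl2 : PySem.Chars.slice cs (some (((pre.length : Nat) : Int) + 1)) none = suf := by
      rw [PySem.Chars.slice_eq_listSlice]
      have : ((pre.length : Int) + 1) = (((pre.length + 1 : Nat)) : Int) := by push_cast; ring
      rw [this, PySem.List.slice_from _ (by positivity)]
      rw [hcseq, Int.toNat_natCast]
      rw [List.drop_append, List.drop_of_length_le (by omega)]
      have : pre.length + 1 - pre.length = 1 := by omega
      rw [this, List.drop_succ_cons, List.drop_zero]
      simp
    rw [hname, hext, hrf, hsl1, hsl2]
  · -- no dot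
    have hsp : PySem.Chars.splitOn cs ['.'] = [cs] := by
      rw [splitOn_eq_sp, sp_no_dot cs hd]
    have hrf : PySem.Chars.rfind cs ['.'] = -1 := rfind_no_dot cs hd
    simp [hsp, hrf]
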